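-- pv_equiv track=rewrite | github.com/ssakhabaevv/labb | 33.py | get_column_order
-- ===== SOURCE A (Python) =====
-- def get_column_order(key):
--     key_positions = sorted((char, index) for index, char in enumerate(key))
--     order = [0] * len(key)
--     current_number = 1
--     for _, index in key_positions:
--         order[index] = current_number
--         current_number += 1
--     return order
-- ===== SOURCE B (Python) =====
-- def get_column_order(key):
--     n = len(key)
--     order = []
--     for i in range(n):
--         rank = 1
--         for j in range(n):
--             if key[j] < key[i] or (key[j] == key[i] and j < i):
--                 rank += 1
--         order.append(rank)
--     return order
-- ===== Notes on version B (the rewrite author's own statement) =====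
-- stated objective: alternative
-- what changed: Replaces the sort-and-invert-permutation pass by a direct rank computation: order[i] = 1 + (# positions with a strictly smaller character) + (# earlier positions with an equal character), reproducing the stable sort's tie-break by counting instead of sorting.
import Mathlib
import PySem

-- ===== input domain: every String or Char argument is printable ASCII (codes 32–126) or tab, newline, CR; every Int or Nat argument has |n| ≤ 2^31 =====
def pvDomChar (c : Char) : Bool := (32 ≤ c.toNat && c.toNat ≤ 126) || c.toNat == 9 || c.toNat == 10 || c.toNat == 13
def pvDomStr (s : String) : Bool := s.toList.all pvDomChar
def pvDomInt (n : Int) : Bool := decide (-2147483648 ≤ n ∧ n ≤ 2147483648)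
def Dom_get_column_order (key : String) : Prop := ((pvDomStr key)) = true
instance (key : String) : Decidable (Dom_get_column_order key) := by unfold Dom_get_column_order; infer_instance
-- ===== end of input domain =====

-- B replaces A's sort-and-invert-permutation pass by a direct O(n^2) counting of each
-- position's rank (strictly smaller characters anywhere, equal characters earlier);
-- same result, no speed claim.

-- ===== PORT A =====
def get_column_order (key : String) : List Int :=
  let key_positions := PySem.List.sorted2
      ((PySem.List.enumerate key.toList).map (fun p => (p.2, p.1)))
      (fun q => q.1) (fun q => q.2)
  let order := PySem.List.pyRepeat [(0 : Int)] (PySem.Str.len key)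
  (key_positions.foldl
      (fun (s : List Int × Int) q => (PySem.List.pySetD s.1 q.2 s.2, s.2 + 1))
      (order, 1)).1

-- ===== PORT B =====
def get_column_order_alt (key : String) : List Int :=
  let cs := key.toList
  let n := PySem.Str.len key
  (PySem.List.pyRange 0 n).foldl
    (fun order i =>
      order ++ [(PySem.List.pyRange 0 n).foldl
        (fun rank j =>
          if PySem.List.pyGetD cs j ' ' < PySem.List.pyGetD cs i ' ' ∨
             (PySem.List.pyGetD cs j ' ' = PySem.List.pyGetD cs i ' ' ∧ j < i)
          then rank + 1 else rank) 1]) []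

-- ===== PRECONDITION & SPEC =====
def Spec_get_column_order (key : String) (out : List Int) : Prop := out = get_column_order_alt key
instance (key : String) (out : List Int) : Decidable (Spec_get_column_order key out) := by unfold Spec_get_column_order; infer_instance

-- ===== CLAIM (what is proved, stated in full; the proofs are below) =====
def Claim_equal_get_column_order : Prop := ∀ (key : String), Dom_get_column_order key → Spec_get_column_order key (get_column_order key)

-- ===== LEMMAS AND PROOFS =====

-- A's write-loop state transformer: (order, current_number) → one assignment step.
def pvStep : List Int × Int → Char × Int → List Int × Int :=
  fun s q => (PySem.List.pySetD s.1 q.2 s.2, s.2 + 1)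

theorem pvStep_len (S : List (Char × Int)) (o : List Int) (c : Int) :
    (S.foldl pvStep (o, c)).1.length = o.length := by
  induction S generalizing o c with
  | nil => rfl
  | cons q S ih => simp [List.foldl_cons, pvStep, ih, PySem.List.length_pySetD]

theorem pvStep_keep (S : List (Char × Int)) (o : List Int) (c : Int) (i : Nat)
    (h0 : ∀ q ∈ S, 0 ≤ q.2) (hne : ∀ q ∈ S, q.2 ≠ (i : Int)) :
    ((S.foldl pvStep (o, c)).1)[i]? = o[i]? := by
  induction S generalizing o c with
  | nil => rfl
  | cons q S ih =>
      have h0q : 0 ≤ q.2 := h0 q (by simp)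
      have hq : q.2.toNat ≠ i := by
        intro h
        exact hne q (by simp) (by omega)
      rw [List.foldl_cons]
      show ((S.foldl pvStep (PySem.List.pySetD o q.2 c, c + 1)).1)[i]? = o[i]?
      rw [ih _ _ (fun r hr => h0 r (by simp [hr])) (fun r hr => hne r (by simp [hr]))]
      rw [PySem.List.pySetD_of_nonneg _ _ h0q, List.getElem?_set_ne hq]

theorem pvStep_at (S : List (Char × Int)) (o : List Int) (c : Int) (p : Nat)
    (hp : p < S.length)
    (hr : ∀ q ∈ S, 0 ≤ q.2 ∧ q.2.toNat < o.length)
    (hnd : (S.map (fun q => q.2)).Nodup) :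
    ((S.foldl pvStep (o, c)).1)[(S[p].2).toNat]? = some (c + p) := by
  induction S generalizing o c p with
  | nil => simp at hp
  | cons q S ih =>
      rw [List.foldl_cons]
      show ((S.foldl pvStep (PySem.List.pySetD o q.2 c, c + 1)).1)[((q :: S)[p].2).toNat]? = some (c + p)
      have h0q : 0 ≤ q.2 := (hr q (by simp)).1
      have hlq : q.2.toNat < o.length := (hr q (by simp)).2
      cases p with
      | zero =>
          simp only [List.getElem_cons_zero]
          rw [pvStep_keep _ _ _ _ (fun r hr' => (hr r (by simp [hr'])).1)]
          · rw [PySem.List.pySetD_of_nonneg _ _ h0q, List.getElem?_set_self hlq]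
            simp
          · intro r hrS
            have : q.2 ∉ S.map (fun q => q.2) := by
              simp only [List.map_cons, List.nodup_cons] at hnd
              exact hnd.1
            intro h
            have h2 : (q.2.toNat : Int) = q.2 := by omega
            rw [h2] at h
            exact this (h ▸ List.mem_map_of_mem hrS)
      | succ p =>
          simp only [List.getElem_cons_succ]
          have := ih (PySem.List.pySetD o q.2 c) (c + 1) p (by simpa using hp)
            (fun r hrS => ⟨(hr r (by simp [hrS])).1,
              by rw [PySem.List.length_pySetD]; exact (hr r (by simp [hrS])).2⟩)
            (by simp only [List.map_cons, List.nodup_cons] at hnd; exact hnd.2)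
          rw [this]
          congr 1
          push_cast
          ring

theorem pvStrictIdx {α : Type} (R : α → α → Prop) [DecidableRel R]
    (hasymm : ∀ a b, R a b → ¬ R b a) :
    ∀ (L : List α) (p : Nat) (x : α), L[p]? = some x → L.Pairwise R →
      L.countP (fun y => decide (R y x)) = p := by
  intro L
  induction L with
  | nil => intro p x hx; simp at hx
  | cons a L ih =>
      intro p x hx hpw
      rw [List.pairwise_cons] at hpw
      cases p with
      | zero =>
          simp only [List.getElem?_cons_zero, Option.some.injEq] at hx
          subst hx
          rw [List.countP_eq_zero]
          intro y hy
          simp only [List.mem_cons] at hy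
          rcases hy with rfl | hy
          · simpa using fun h => hasymm _ _ h h
          · simpa using hasymm _ _ (hpw.1 y hy)
      | succ p =>
          simp only [List.getElem?_cons_succ] at hx
          have hxm : x ∈ L := List.mem_of_getElem? hx
          have hRa : R a x := hpw.1 _ hxm
          rw [List.countP_cons, ih p x hx hpw.2]
          simp [hRa]

theorem pvSorted2_eq (xs : List (Char × Int)) :
    PySem.List.sorted2 xs (fun q => q.1) (fun q => q.2) =
    PySem.List.sorted xs (fun q => (toLex q : Char ×ₗ Int)) := by
  rw [PySem.List.sorted_eq_foldl_insertBy]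
  unfold PySem.List.sorted2
  simp only [Bool.false_eq_true, if_false]
  have hbb : (fun (a b : Char × Int) =>
        (decide (a.1 < b.1) || (!decide (b.1 < a.1) && decide (a.2 < b.2)))) =
      (fun a b => decide ((toLex a : Char ×ₗ Int) < toLex b)) := by
    funext a b
    have h : ((toLex a : Char ×ₗ Int) < toLex b) ↔ (a.1 < b.1 ∨ a.1 = b.1 ∧ a.2 < b.2) :=
      Prod.Lex.toLex_lt_toLex
    rcases lt_trichotomy a.1 b.1 with hc | hc | hc
    · simp [h, hc, lt_asymm hc]
    · simp [h, hc]
    · simp [h, hc, lt_asymm hc, ne_of_gt hc]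
  rw [hbb]

theorem pv_main (key : String) : get_column_order key = get_column_order_alt key := by
  set cs := key.toList with hcs
  set n := cs.length with hn
  set g : Int → Char × Int := fun j => (PySem.List.pyGetD cs j ' ', j) with hg
  set P : List (Char × Int) := (PySem.List.enumerate cs).map (fun p => (p.2, p.1)) with hPdef
  set S : List (Char × Int) := PySem.List.sorted2 P (fun q => q.1) (fun q => q.2) with hSdef
  set o : List Int := PySem.List.pyRepeat [(0 : Int)] (PySem.Str.len key) with hodef
  have hlenkey : PySem.Str.len key = (n : Int) := by rw [PySem.Str.len_eq]
  have ho : o = List.replicate n (0 : Int) := by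
    rw [hodef, hlenkey, PySem.List.pyRepeat_singleton]; simp
  have hA : get_column_order key = (S.foldl pvStep (o, 1)).1 := rfl
  have hP : P = (PySem.List.pyRange 0 (n : Int)).map g := by
    rw [hPdef, PySem.List.enumerate_eq_map_pyRange cs ' ', List.map_map]
    rfl
  have hSperm : S.Perm P := by
    rw [hSdef, pvSorted2_eq]; exact PySem.List.sorted_perm _ _ _
  have hsnd : P.map (fun q => q.2) = PySem.List.pyRange 0 (n : Int) := by
    rw [hP, List.map_map]
    simp [hg, Function.comp_def]
  have hSnodup : (S.map (fun q => q.2)).Nodup := by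
    rw [(hSperm.map (fun q => q.2)).nodup_iff, hsnd]
    exact PySem.List.nodup_pyRange_one 0 (n : Int)
  have hrange : ∀ q ∈ S, 0 ≤ q.2 ∧ q.2.toNat < o.length := by
    intro q hq
    have : q ∈ P := hSperm.mem_iff.mp hq
    rw [hP] at this
    obtain ⟨j, hj, rfl⟩ := List.mem_map.mp this
    obtain ⟨hj0, hjn⟩ := PySem.List.mem_pyRange_one.mp hj
    rw [ho, List.length_replicate]
    simp only [hg]
    exact ⟨hj0, by omega⟩
  -- strict pairwise order on S under the lexicographic key
  have hR : S.Pairwise (fun a b => (toLex a : Char ×ₗ Int) < toLex b) := by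
    have hle : S.Pairwise (fun a b => (toLex a : Char ×ₗ Int) ≤ toLex b) := by
      rw [hSdef, pvSorted2_eq]
      exact PySem.List.sorted_pairwise _ _
    have hnd : S.Nodup := List.Nodup.of_map _ hSnodup
    exact (hle.and hnd).imp (fun {a b} h =>
      lt_of_le_of_ne h.1 (fun he => h.2 (toLex.injective he)))
  -- B as a map of per-index ranks
  have hB : get_column_order_alt key =
      (PySem.List.pyRange 0 (n : Int)).map (fun i =>
        1 + ((PySem.List.pyRange 0 (n : Int)).countP (fun j =>
          decide (PySem.List.pyGetD cs j ' ' < PySem.List.pyGetD cs i ' ' ∨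
            (PySem.List.pyGetD cs j ' ' = PySem.List.pyGetD cs i ' ' ∧ j < i))) : Int)) := by
    show ((PySem.List.pyRange 0 (PySem.Str.len key)).foldl _ []) = _
    rw [hlenkey]
    rw [PySem.List.foldl_append_singleton_eq_map (f := fun i =>
      (PySem.List.pyRange 0 (n : Int)).foldl (fun rank j =>
        if PySem.List.pyGetD cs j ' ' < PySem.List.pyGetD cs i ' ' ∨
           (PySem.List.pyGetD cs j ' ' = PySem.List.pyGetD cs i ' ' ∧ j < i)
        then rank + 1 else rank) 1)]
    rw [List.nil_append]
    apply List.map_congr_left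
    intro i _
    rw [PySem.List.foldl_ite_add_one]
  -- pointwise comparison
  rw [hA, hB]
  apply List.ext_getElem?
  intro i
  by_cases hi : i < n
  · -- the interesting case
    set x : Char × Int := g (i : Int) with hx
    have hxP : x ∈ P := by
      rw [hP]
      exact List.mem_map_of_mem (PySem.List.mem_pyRange_one.mpr ⟨by omega, by omega⟩)
    obtain ⟨p, hp, hxp⟩ := List.mem_iff_getElem.mp (hSperm.mem_iff.mpr hxP)
    -- A side
    have hAi : ((S.foldl pvStep (o, 1)).1)[i]? = some (1 + (p : Int)) := by
      have := pvStep_at S o 1 p hp hrange hSnodup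
      have h2 : (S[p]'hp).2.toNat = i := by rw [hxp]; simp [hx, hg]
      rw [h2] at this
      exact this
    -- the position p is the rank count
    have hcount : S.countP (fun y => decide ((toLex y : Char ×ₗ Int) < toLex x)) = p := by
      refine pvStrictIdx _ (fun a b h h' => absurd h' (not_lt_of_gt h)) S p x ?_ hR
      rw [List.getElem?_eq_getElem hp, hxp]
    rw [hSperm.countP_eq] at hcount
    rw [hP, List.countP_map] at hcount
    have hpred : ((fun y => decide ((toLex y : Char ×ₗ Int) < toLex x)) ∘ g) =
        (fun j => decide (PySem.List.pyGetD cs j ' ' < PySem.List.pyGetD cs (i : Int) ' ' ∨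
          (PySem.List.pyGetD cs j ' ' = PySem.List.pyGetD cs (i : Int) ' ' ∧ j < (i : Int)))) := by
      funext j
      simp only [Function.comp_apply]
      apply decide_eq_decide.mpr
      rw [hx, hg]
      exact Prod.Lex.toLex_lt_toLex
    rw [hpred] at hcount
    -- B side
    have hBi : ((PySem.List.pyRange 0 (n : Int)).map (fun i =>
        1 + ((PySem.List.pyRange 0 (n : Int)).countP (fun j =>
          decide (PySem.List.pyGetD cs j ' ' < PySem.List.pyGetD cs i ' ' ∨
            (PySem.List.pyGetD cs j ' ' = PySem.List.pyGetD cs i ' ' ∧ j < i))) : Int)))[i]? =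
        some (1 + (p : Int)) := by
      rw [List.getElem?_map, PySem.List.getElem?_pyRange_one]
      rw [if_pos (by omega)]
      simp only [Option.map_some, zero_add, hcount]
    rw [hAi, hBi]
  · -- out of range on both sides
    have hAe : ((S.foldl pvStep (o, 1)).1).length = n := by
      rw [pvStep_len, ho, List.length_replicate]
    rw [List.getElem?_eq_none (by omega : ((S.foldl pvStep (o, 1)).1).length ≤ i)]
    rw [List.getElem?_eq_none]
    rw [List.length_map, PySem.List.length_pyRange_one]
    omega

-- ===== VERDICT (by name: the statement is the Claim_ definition above) =====
theorem get_column_order_spec : Claim_equal_get_column_order := by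
  intro key _
  exact pv_main key
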